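-- pv_equiv track=rewrite | github.com/PA-6511/ai_media_os | monitoring/anomaly_detector.py | _all_signal_zero_streak_days
-- ===== SOURCE A (Python) =====
-- from typing import Any
--
-- def _all_signal_zero_streak_days(report_history: list[dict[str, Any]]) -> int:
--     """全 signal (combined/price_only/release_only) が 0 の連続日数を数える。"""
--     if not report_history:
--         return 0
--
--     streak = 0
--     for report in reversed(report_history):
--         combined = int(report.get("combined_count", 0) or 0)
--         price_only = int(report.get("price_only_count", 0) or 0)
--         release_only = int(report.get("release_only_count", 0) or 0)
--
--         if combined == 0 and price_only == 0 and release_only == 0: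
--             streak += 1
--         else:
--             break
--
--     return streak
-- ===== SOURCE B (Python) =====
-- def _all_signal_zero_streak_days(report_history: list) -> int:
--     """全 signal (combined/price_only/release_only) が 0 の連続日数を数える。"""
--     last_nonzero = -1
--     for i, report in enumerate(report_history):
--         combined = int(report.get("combined_count", 0) or 0)
--         price_only = int(report.get("price_only_count", 0) or 0)
--         release_only = int(report.get("release_only_count", 0) or 0)
--         if combined != 0 or price_only != 0 or release_only != 0:
--             last_nonzero = i
--     return len(report_history) - last_nonzero - 1
-- ===== Notes on version B (the rewrite author's own statement) =====
-- stated objective: alternative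
-- what changed: Replaces the reversed scan with early break (counting the trailing zero streak) by a single forward pass that tracks the index of the last day with a non-zero signal and returns len - last_nonzero - 1.
import Mathlib
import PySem

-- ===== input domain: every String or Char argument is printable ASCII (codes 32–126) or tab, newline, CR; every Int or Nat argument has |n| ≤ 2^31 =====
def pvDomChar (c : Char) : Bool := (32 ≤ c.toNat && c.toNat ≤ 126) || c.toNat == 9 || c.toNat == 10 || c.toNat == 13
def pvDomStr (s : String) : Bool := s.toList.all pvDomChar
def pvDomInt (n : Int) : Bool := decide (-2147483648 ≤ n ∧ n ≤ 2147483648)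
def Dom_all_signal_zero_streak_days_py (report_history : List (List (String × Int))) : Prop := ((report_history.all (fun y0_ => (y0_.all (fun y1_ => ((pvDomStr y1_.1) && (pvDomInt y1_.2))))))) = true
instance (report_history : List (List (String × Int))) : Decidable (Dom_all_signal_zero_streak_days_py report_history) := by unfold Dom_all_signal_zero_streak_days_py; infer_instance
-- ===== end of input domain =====

-- B replaces A's reversed scan-with-break by a forward pass tracking the last non-zero index (alternative decomposition, same cost).

-- ===== PORT A =====
-- `int(report.get(k, 0) or 0)` on an Int value: `v or 0` is 0 when v == 0 and v otherwise; int() is the identity on ints.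
def pyOrZeroInt (v : Int) : Int := if v = 0 then 0 else v

-- the three fetch-and-coerce lines shared verbatim by both Pythons, plus the all-zero test
def signalsZero (report : List (String × Int)) : Bool :=
  let combined := pyOrZeroInt (PySem.Dict.getD (PySem.Dict.mk report) "combined_count" 0)
  let price_only := pyOrZeroInt (PySem.Dict.getD (PySem.Dict.mk report) "price_only_count" 0)
  let release_only := pyOrZeroInt (PySem.Dict.getD (PySem.Dict.mk report) "release_only_count" 0)
  combined == 0 && price_only == 0 && release_only == 0

-- the `for report in reversed(...)` loop with its break, as structural recursion on the reversed list
def streakLoop : List (List (String × Int)) → Int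
  | [] => 0
  | r :: rest => if signalsZero r then streakLoop rest + 1 else 0

def all_signal_zero_streak_days_py (report_history : List (List (String × Int))) : Int :=
  if report_history = [] then 0 else streakLoop report_history.reverse

-- ===== PORT B =====
def all_signal_zero_streak_days_py_alt (report_history : List (List (String × Int))) : Int :=
  let last_nonzero :=
    (PySem.List.enumerate report_history 0).foldl
      (fun last p => if signalsZero p.2 then last else p.1) (-1)
  (report_history.length : Int) - last_nonzero - 1

-- ===== PRECONDITION & SPEC =====
def Spec_all_signal_zero_streak_days_py (report_history : List (List (String × Int))) (out : Int) : Prop := out = all_signal_zero_streak_days_py_alt report_history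
instance (report_history : List (List (String × Int))) (out : Int) : Decidable (Spec_all_signal_zero_streak_days_py report_history out) := by unfold Spec_all_signal_zero_streak_days_py; infer_instance

-- ===== CLAIM (what is proved, stated in full; the proofs are below) =====
def Claim_equal_all_signal_zero_streak_days_py : Prop := ∀ (report_history : List (List (String × Int))), Dom_all_signal_zero_streak_days_py report_history → Spec_all_signal_zero_streak_days_py report_history (all_signal_zero_streak_days_py report_history)

-- ===== LEMMAS AND PROOFS =====

def lastNZ (l : List (List (String × Int))) : Int :=
  (PySem.List.enumerate l 0).foldl (fun last p => if signalsZero p.2 then last else p.1) (-1)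

theorem lastNZ_concat (l : List (List (String × Int))) (x : List (String × Int)) :
    lastNZ (l ++ [x]) = if signalsZero x then lastNZ l else (l.length : Int) := by
  simp [lastNZ, PySem.List.enumerate_append, List.foldl_append, PySem.List.enumerate]

theorem streak_eq (l : List (List (String × Int))) :
    streakLoop l.reverse = (l.length : Int) - lastNZ l - 1 := by
  induction l using List.reverseRecOn with
  | nil => simp [streakLoop, lastNZ, PySem.List.enumerate]
  | append_singleton l x ih =>
      rw [List.reverse_append, lastNZ_concat]
      simp only [List.reverse_singleton, List.singleton_append, streakLoop, List.length_append,
        List.length_singleton]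
      by_cases h : signalsZero x
      · simp only [h, if_true, ih]; push_cast; ring
      · simp only [h]; push_cast; ring

-- ===== VERDICT (by name: the statement is the Claim_ definition above) =====
theorem all_signal_zero_streak_days_py_spec : Claim_equal_all_signal_zero_streak_days_py := by
  intro l _
  unfold Spec_all_signal_zero_streak_days_py all_signal_zero_streak_days_py
    all_signal_zero_streak_days_py_alt
  by_cases h : l = []
  · subst h; simp [PySem.List.enumerate]
  · simp only [h, if_false]
    exact streak_eq l
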